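-- pv_equiv track=rewrite | github.com/acorg/dark-matter | src/dark/aligners.py | removeFirstUnnecessaryGaps
-- ===== SOURCE A (Python) =====
-- from typing import Optional, Tuple
--
-- def removeFirstUnnecessaryGaps(
--     seq1: str, seq2: str, gapSymbol: str = "-"
-- ) -> Tuple[bool, str, str]:
--     """
--     Find and remove the first set of gaps in two sequences that can be removed
--     without increasing the difference between the strings.
--
--     @param seq1: A C{str} sequence string.
--     @param seq2: A C{str} sequence string.
--     @param gapSymbol: A C{str} 1-character symbol to use for gaps.
--     @return: A 3-C{tuple} with either C{True} and two new C{str} sequences or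
--         C{False} and two empty strings if no removable gaps were found. The
--         C{True} and C{False} first elements are just there to keep mypy happy,
--         seeing as I couldn't figure out how to return (None, None) without
--         getting warnings.
--     """
--     assert len(seq1) == len(seq2)
--     for start in range(len(seq1)):
--         if seq1[start] == gapSymbol:
--             if seq2[start] == gapSymbol:
--                 raise ValueError(
--                     f"Sequences {seq1!r} and {seq2!r} both have "
--                     f"a gap ({gapSymbol!r}) at offset {start}!"
--                 )
--             first, second = seq1, seq2
--             break
--         elif seq2[start] == gapSymbol:
--             assert seq1[start] != gapSymbol
--             first, second = seq2, seq1
--             break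
--     else:
--         # Did not find any gaps.
--         return False, "", ""
--
--     excessGapCount = 1
--     for end in range(start + 1, len(first)):
--         if first[end] == gapSymbol:
--             assert second[end] != gapSymbol
--             excessGapCount += 1
--         elif second[end] == gapSymbol:
--             excessGapCount -= 1
--             if excessGapCount == 0:
--                 break
--     else:
--         # We did not get down to zero gaps. This will never happen if we
--         # were originally called as a result of a call to edlibAlign
--         # (below) and it only calls removeUnnecessaryGaps (also below) when
--         # both original sequences have a different length from their
--         # aligned versions. In that case there must be at least one gap in
--         # both sequences. But for now this is not considered an error
--         # because we may not have been called by removeUnnecessaryGaps.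
--         return False, "", ""
--
--     subseq1 = seq1[start : end + 1]
--     subseq1noGaps = subseq1.replace(gapSymbol, "")
--     subseq2 = seq2[start : end + 1]
--     subseq2noGaps = subseq2.replace(gapSymbol, "")
--
--     diffsWithGaps = sum(a != b for (a, b) in zip(subseq1, subseq2))
--     diffsWithoutGaps = sum(a != b for (a, b) in zip(subseq1noGaps, subseq2noGaps))
--
--     if diffsWithoutGaps <= diffsWithGaps:
--         # The subsequences match at least as well without gaps, so replace
--         # the gapped region in each sequence with its ungapped version.
--         return (
--             True,
--             seq1[:start] + subseq1noGaps + seq1[end + 1 :],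
--             seq2[:start] + subseq2noGaps + seq2[end + 1 :],
--         )
--     else:
--         return False, "", ""
-- ===== SOURCE B (Python) =====
-- def removeFirstUnnecessaryGaps(seq1, seq2, gapSymbol="-"):
--     """Single left-to-right pass: find the first gap, then keep scanning while
--     maintaining the gap-balance counter and simultaneously accumulating the
--     with-gaps difference count and the two ungapped region strings, instead of
--     slicing and re-scanning the region afterwards."""
--     assert len(seq1) == len(seq2)
--     n = len(seq1)
--     for start in range(n):
--         g1 = seq1[start] == gapSymbol
--         g2 = seq2[start] == gapSymbol
--         if g1 and g2:
--             raise ValueError(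
--                 f"Sequences {seq1!r} and {seq2!r} both have "
--                 f"a gap ({gapSymbol!r}) at offset {start}!"
--             )
--         if g1 or g2:
--             firstIsSeq1 = g1
--             break
--     else:
--         # Did not find any gaps.
--         return False, "", ""
--
--     c1, c2 = seq1[start], seq2[start]
--     diffsWithGaps = int(c1 != c2)
--     ng1 = [] if c1 == gapSymbol else [c1]
--     ng2 = [] if c2 == gapSymbol else [c2]
--     balance = 1
--     for end in range(start + 1, n):
--         c1, c2 = seq1[end], seq2[end]
--         g1 = c1 == gapSymbol
--         g2 = c2 == gapSymbol
--         diffsWithGaps += c1 != c2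
--         if not g1:
--             ng1.append(c1)
--         if not g2:
--             ng2.append(c2)
--         if (g1 if firstIsSeq1 else g2):
--             balance += 1
--         elif (g2 if firstIsSeq1 else g1):
--             balance -= 1
--             if balance == 0:
--                 break
--     else:
--         # The balance never returned to zero.
--         return False, "", ""
--
--     diffsWithoutGaps = sum(a != b for (a, b) in zip(ng1, ng2))
--     if diffsWithoutGaps <= diffsWithGaps:
--         return (
--             True,
--             seq1[:start] + "".join(ng1) + seq1[end + 1:],
--             seq2[:start] + "".join(ng2) + seq2[end + 1:],
--         )
--     else:
--         return False, "", ""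
-- ===== Notes on version B (the rewrite author's own statement) =====
-- stated objective: alternative
-- what changed: B fuses A's three phases (find-gap scan, balance scan, then slicing and re-scanning the region for diffs and gap removal) into a single left-to-right pass that maintains the balance counter while simultaneously accumulating the with-gaps difference count and building both ungapped region strings character by character.
-- outside the precondition, e.g. on removeFirstUnnecessaryGaps('-a--', 'a---', '-'): A returns (True, 'a--', 'a--'), B returns (True, 'a--', 'a--')
import Mathlib
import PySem

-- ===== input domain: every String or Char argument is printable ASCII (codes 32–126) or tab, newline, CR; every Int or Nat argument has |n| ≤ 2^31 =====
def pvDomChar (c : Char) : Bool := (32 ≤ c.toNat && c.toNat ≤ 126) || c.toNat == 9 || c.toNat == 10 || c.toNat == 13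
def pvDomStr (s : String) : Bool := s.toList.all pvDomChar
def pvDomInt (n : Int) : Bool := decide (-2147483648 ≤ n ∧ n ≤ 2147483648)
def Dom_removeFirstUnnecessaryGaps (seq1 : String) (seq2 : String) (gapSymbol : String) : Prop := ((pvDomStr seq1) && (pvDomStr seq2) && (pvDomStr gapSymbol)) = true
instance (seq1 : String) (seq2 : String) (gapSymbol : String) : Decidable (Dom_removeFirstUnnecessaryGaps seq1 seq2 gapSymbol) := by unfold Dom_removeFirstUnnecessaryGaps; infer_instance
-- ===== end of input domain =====

-- B makes one left-to-right pass that maintains the balance counter while also accumulating the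
-- with-gaps diff count and both ungapped region strings, instead of A's find/balance/slice-and-rescan
-- phases; same return value on Pre_ (A's assert/ValueError inputs are excluded there).

-- `c == gapSymbol` where c is one character of a sequence (Python compares 1-char strings)
def pvIsGap (g : String) (c : Char) : Bool := g.toList == [c]

-- sum(a != b for (a, b) in zip(x, y))  (both Pythons contain this literal expression)
def pvZipDiffs (x y : List Char) : Int :=
  ((x.zip y).map (fun p => if p.1 ≠ p.2 then (1 : Int) else 0)).sum

-- ===== PORT A =====
-- first loop: "for start in range(len(seq1))" with indexing, as structural recursion over both
-- character lists carrying the index; returns the for-else `none` or some (start, first-is-seq1)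
def pvScanA (g : String) : List Char → List Char → Nat → Option (Nat × Bool)
  | c1 :: r1, c2 :: r2, i =>
    if pvIsGap g c1 then
      if pvIsGap g c2 then none          -- Python raises ValueError here; excluded by Pre_
      else some (i, true)                -- first, second = seq1, seq2
    else if pvIsGap g c2 then some (i, false)   -- first, second = seq2, seq1
    else pvScanA g r1 r2 (i + 1)
  | _, _, _ => none                      -- for-else: did not find any gaps

-- second loop: "for end in range(start+1, len(first))" over the two suffixes, carrying `end`
-- and excessGapCount; returns the for-else `none` or some end
def pvLoopA (g : String) : List Char → List Char → Nat → Int → Option Nat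
  | f1 :: r1, s1 :: r2, e, cnt =>
    if pvIsGap g f1 then
      -- (Python also asserts second[end] != gapSymbol here; failures are excluded by Pre_)
      pvLoopA g r1 r2 (e + 1) (cnt + 1)
    else if pvIsGap g s1 then
      if cnt - 1 = 0 then some e else pvLoopA g r1 r2 (e + 1) (cnt - 1)
    else pvLoopA g r1 r2 (e + 1) cnt
  | _, _, _, _ => none                   -- for-else: never got down to zero gaps

def removeFirstUnnecessaryGaps (seq1 : String) (seq2 : String) (gapSymbol : String) : Bool × String × String :=
  let l1 := seq1.toList
  let l2 := seq2.toList
  -- assert len(seq1) == len(seq2): raises on unequal lengths; excluded by Pre_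
  match pvScanA gapSymbol l1 l2 0 with
  | none => (false, "", "")
  | some (start, f) =>
    let first := if f then l1 else l2
    let second := if f then l2 else l1
    match pvLoopA gapSymbol (first.drop (start + 1)) (second.drop (start + 1)) (start + 1) 1 with
    | none => (false, "", "")
    | some e =>
      -- seq[start : e+1]: 0 ≤ start ≤ e < len here, so drop/take is the exact Python slice
      let sub1 := (l1.drop start).take (e + 1 - start)
      let sub2 := (l2.drop start).take (e + 1 - start)
      -- subseq.replace(gapSymbol, ""): this line only runs after some character compared equal to
      -- gapSymbol, so gapSymbol is a single character and replace removes exactly the gap characters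
      let sub1ng := sub1.filter (fun c => !pvIsGap gapSymbol c)
      let sub2ng := sub2.filter (fun c => !pvIsGap gapSymbol c)
      let diffsWithGaps := pvZipDiffs sub1 sub2
      let diffsWithoutGaps := pvZipDiffs sub1ng sub2ng
      if diffsWithoutGaps ≤ diffsWithGaps then
        (true, String.mk (l1.take start ++ sub1ng ++ l1.drop (e + 1)),
               String.mk (l2.take start ++ sub2ng ++ l2.drop (e + 1)))
      else (false, "", "")

-- ===== PORT B =====
-- B's first loop: same scan written with g1/g2 flags; returns some (start, firstIsSeq1)
def pvScanB (g : String) : List Char → List Char → Nat → Option (Nat × Bool)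
  | c1 :: r1, c2 :: r2, i =>
    let g1 := pvIsGap g c1
    let g2 := pvIsGap g c2
    if g1 && g2 then none                -- Python raises ValueError here; excluded by Pre_
    else if g1 || g2 then some (i, g1)
    else pvScanB g r1 r2 (i + 1)
  | _, _, _ => none                      -- for-else: did not find any gaps

-- B's fused loop: walks seq1/seq2 together from start+1 carrying end, balance, diffsWithGaps and
-- the two ungapped accumulators; returns the for-else `none` or some (end, diffs, ng1, ng2)
def pvLoopB (g : String) (f : Bool) : List Char → List Char → Nat → Int → Int → List Char → List Char → Option (Nat × Int × List Char × List Char)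
  | c1 :: r1, c2 :: r2, e, bal, d, n1, n2 =>
    let g1 := pvIsGap g c1
    let g2 := pvIsGap g c2
    let d' := d + (if c1 ≠ c2 then 1 else 0)
    let n1' := if g1 then n1 else n1 ++ [c1]
    let n2' := if g2 then n2 else n2 ++ [c2]
    if (if f then g1 else g2) then pvLoopB g f r1 r2 (e + 1) (bal + 1) d' n1' n2'
    else if (if f then g2 else g1) then
      if bal - 1 = 0 then some (e, d', n1', n2')
      else pvLoopB g f r1 r2 (e + 1) (bal - 1) d' n1' n2'
    else pvLoopB g f r1 r2 (e + 1) bal d' n1' n2'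
  | _, _, _, _, _, _, _ => none          -- for-else: the balance never returned to zero

def removeFirstUnnecessaryGaps_alt (seq1 : String) (seq2 : String) (gapSymbol : String) : Bool × String × String :=
  let l1 := seq1.toList
  let l2 := seq2.toList
  -- assert len(seq1) == len(seq2): raises on unequal lengths; excluded by Pre_
  match pvScanB gapSymbol l1 l2 0 with
  | none => (false, "", "")
  | some (start, f) =>
    let c1 := l1.getD start ' '          -- seq1[start]; start < length here, so getD is exact
    let c2 := l2.getD start ' '
    let d0 : Int := if c1 ≠ c2 then 1 else 0
    let n1 := if pvIsGap gapSymbol c1 then [] else [c1]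
    let n2 := if pvIsGap gapSymbol c2 then [] else [c2]
    match pvLoopB gapSymbol f (l1.drop (start + 1)) (l2.drop (start + 1)) (start + 1) 1 d0 n1 n2 with
    | none => (false, "", "")
    | some (e, d, ng1, ng2) =>
      let diffsWithoutGaps := pvZipDiffs ng1 ng2
      if diffsWithoutGaps ≤ d then
        (true, String.mk (l1.take start ++ ng1 ++ l1.drop (e + 1)),
               String.mk (l2.take start ++ ng2 ++ l2.drop (e + 1)))
      else (false, "", "")

-- ===== PRECONDITION & SPEC =====
-- Pre_ excludes (a) unequal lengths (A's assert raises) and (b) any offset where both sequences hold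
-- the gap symbol (A raises ValueError if that is the first gap offset, AssertionError if its balance
-- scan reaches such an offset later).  (b) is slightly wider than A's raise set: a double gap lying
-- beyond the removable region is never scanned and A returns normally (cited in the claim); the exact
-- reachable set would re-simulate the balance loop, which a precondition must not do.
def Pre_removeFirstUnnecessaryGaps (seq1 : String) (seq2 : String) (gapSymbol : String) : Prop :=
  seq1.toList.length = seq2.toList.length ∧
  ∀ p ∈ seq1.toList.zip seq2.toList, ¬(pvIsGap gapSymbol p.1 = true ∧ pvIsGap gapSymbol p.2 = true)
instance (seq1 : String) (seq2 : String) (gapSymbol : String) : Decidable (Pre_removeFirstUnnecessaryGaps seq1 seq2 gapSymbol) := by unfold Pre_removeFirstUnnecessaryGaps; infer_instance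

def pvWitness_removeFirstUnnecessaryGaps : String × String × String := ("a-cb", "abc-", "-")

def Spec_removeFirstUnnecessaryGaps (seq1 : String) (seq2 : String) (gapSymbol : String) (out : Bool × String × String) : Prop := out = removeFirstUnnecessaryGaps_alt seq1 seq2 gapSymbol
instance (seq1 : String) (seq2 : String) (gapSymbol : String) (out : Bool × String × String) : Decidable (Spec_removeFirstUnnecessaryGaps seq1 seq2 gapSymbol out) := by unfold Spec_removeFirstUnnecessaryGaps; infer_instance

-- ===== CLAIM (what is proved, stated in full; the proofs are below) =====
def Claim_equal_removeFirstUnnecessaryGaps : Prop := ∀ (seq1 : String) (seq2 : String) (gapSymbol : String), Dom_removeFirstUnnecessaryGaps seq1 seq2 gapSymbol → Pre_removeFirstUnnecessaryGaps seq1 seq2 gapSymbol → Spec_removeFirstUnnecessaryGaps seq1 seq2 gapSymbol (removeFirstUnnecessaryGaps seq1 seq2 gapSymbol)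

-- ===== LEMMAS AND PROOFS =====

theorem pvZipDiffs_cons (a b : Char) (x y : List Char) :
    pvZipDiffs (a :: x) (b :: y) = (if a ≠ b then (1 : Int) else 0) + pvZipDiffs x y := by
  simp [pvZipDiffs]

-- the two first-pass scans are extensionally equal
theorem pvScan_eq (g : String) : ∀ (l1 l2 : List Char) (i : Nat),
    pvScanB g l1 l2 i = pvScanA g l1 l2 i := by
  intro l1
  induction l1 with
  | nil => intro l2 i; cases l2 <;> simp [pvScanA, pvScanB]
  | cons c1 r1 ih =>
    intro l2 i
    cases l2 with
    | nil => simp [pvScanA, pvScanB]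
    | cons c2 r2 =>
      by_cases h1 : pvIsGap g c1 = true <;> by_cases h2 : pvIsGap g c2 = true <;>
        simp [pvScanA, pvScanB, h1, h2, ih]

-- a successful balance scan ends at or after its starting index
theorem pvLoopA_ge (g : String) : ∀ (r1 r2 : List Char) (e : Nat) (cnt : Int) (e' : Nat),
    pvLoopA g r1 r2 e cnt = some e' → e ≤ e' := by
  intro r1
  induction r1 with
  | nil => intro r2 e cnt e' h; cases r2 <;> simp [pvLoopA] at h
  | cons c1 t1 ih =>
    intro r2 e cnt e' h
    cases r2 with
    | nil => simp [pvLoopA] at h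
    | cons c2 t2 =>
      simp only [pvLoopA] at h
      split_ifs at h with hf hs hz
      · exact Nat.le_of_succ_le (ih _ _ _ _ h)
      · simp at h; omega
      · exact Nat.le_of_succ_le (ih _ _ _ _ h)
      · exact Nat.le_of_succ_le (ih _ _ _ _ h)

-- one step of the region bookkeeping: prepending the just-scanned characters to B's accumulators
theorem pvLoop_step (g : String) (c1 c2 : Char) (t1 t2 : List Char) (e : Nat) (d : Int)
    (n1 n2 : List Char) (d' : Int) (n1' n2' : List Char) (e' : Nat) (h : e + 1 ≤ e')
    (hd : d' = d + (if c1 ≠ c2 then (1 : Int) else 0))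
    (hn1 : n1' = n1 ++ List.filter (fun c => !pvIsGap g c) [c1])
    (hn2 : n2' = n2 ++ List.filter (fun c => !pvIsGap g c) [c2]) :
    (some (e', d' + pvZipDiffs (t1.take (e' + 1 - (e + 1))) (t2.take (e' + 1 - (e + 1))),
       n1' ++ (t1.take (e' + 1 - (e + 1))).filter (fun c => !pvIsGap g c),
       n2' ++ (t2.take (e' + 1 - (e + 1))).filter (fun c => !pvIsGap g c))
      : Option (Nat × Int × List Char × List Char)) =
    some (e', d + pvZipDiffs ((c1 :: t1).take (e' + 1 - e)) ((c2 :: t2).take (e' + 1 - e)),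
       n1 ++ ((c1 :: t1).take (e' + 1 - e)).filter (fun c => !pvIsGap g c),
       n2 ++ ((c2 :: t2).take (e' + 1 - e)).filter (fun c => !pvIsGap g c)) := by
  have hk : e' + 1 - e = (e' + 1 - (e + 1)) + 1 := by omega
  rw [hk]
  subst hd hn1 hn2
  simp only [List.take_succ_cons, pvZipDiffs_cons, List.filter_cons, List.filter_nil,
    List.append_assoc, Option.some.injEq, Prod.mk.injEq, true_and]
  refine ⟨by ring, ?_, ?_⟩ <;> (split <;> simp)

-- the fused pass computes A's end offset together with the region data A recomputes afterwards
theorem pvLoop_eq (g : String) (f : Bool) : ∀ (r1 r2 : List Char) (e : Nat) (bal d : Int)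
    (n1 n2 : List Char),
    pvLoopB g f r1 r2 e bal d n1 n2 =
      match pvLoopA g (if f then r1 else r2) (if f then r2 else r1) e bal with
      | none => none
      | some e' => some (e',
          d + pvZipDiffs (r1.take (e' + 1 - e)) (r2.take (e' + 1 - e)),
          n1 ++ (r1.take (e' + 1 - e)).filter (fun c => !pvIsGap g c),
          n2 ++ (r2.take (e' + 1 - e)).filter (fun c => !pvIsGap g c)) := by
  intro r1
  induction r1 with
  | nil =>
    intro r2 e bal d n1 n2
    cases r2 <;> cases f <;> simp [pvLoopA, pvLoopB]
  | cons c1 t1 ih =>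
    intro r2 e bal d n1 n2
    cases r2 with
    | nil => cases f <;> simp [pvLoopA, pvLoopB]
    | cons c2 t2 =>
      cases f with
      | true =>
        simp only [↓reduceIte] at ih
        simp only [pvLoopA, pvLoopB, ↓reduceIte]
        by_cases h1 : pvIsGap g c1 = true
        · -- excess gap in `first`: both sides recurse with bal + 1
          simp only [h1, ↓reduceIte]
          rw [ih]
          cases hX : pvLoopA g t1 t2 (e + 1) (bal + 1) with
          | none => rfl
          | some e' =>
            exact pvLoop_step g c1 c2 t1 t2 e d n1 n2 _ _ _ e'
              (pvLoopA_ge g _ _ _ _ _ hX) rfl (by simp [h1]) (by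
                by_cases h2 : pvIsGap g c2 = true <;> simp [h2])
        · by_cases h2 : pvIsGap g c2 = true
          · -- gap in `second`: the balance drops; break when it reaches zero
            simp only [h1, h2, ↓reduceIte, Bool.false_eq_true]
            by_cases hz : bal - 1 = 0 <;> simp only [hz, ↓reduceIte]
            · have he : e + 1 - e = 1 := by omega
              rw [he]
              simp [pvZipDiffs, h1, h2]
            · rw [ih]
              cases hX : pvLoopA g t1 t2 (e + 1) (bal - 1) with
              | none => rfl
              | some e' =>
                exact pvLoop_step g c1 c2 t1 t2 e d n1 n2 _ _ _ e'
                  (pvLoopA_ge g _ _ _ _ _ hX) rfl (by simp [h1]) (by simp [h2])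
          · -- no gap at this offset: both sides recurse with the same balance
            simp only [h1, h2, ↓reduceIte, Bool.false_eq_true]
            rw [ih]
            cases hX : pvLoopA g t1 t2 (e + 1) bal with
            | none => rfl
            | some e' =>
              exact pvLoop_step g c1 c2 t1 t2 e d n1 n2 _ _ _ e'
                (pvLoopA_ge g _ _ _ _ _ hX) rfl (by simp [h1]) (by simp [h2])
      | false =>
        simp only [Bool.false_eq_true, ↓reduceIte] at ih
        simp only [pvLoopA, pvLoopB, Bool.false_eq_true, ↓reduceIte]
        by_cases h2 : pvIsGap g c2 = true
        · -- excess gap in `first` (= seq2 here): both sides recurse with bal + 1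
          simp only [h2, ↓reduceIte]
          rw [ih]
          cases hX : pvLoopA g t2 t1 (e + 1) (bal + 1) with
          | none => rfl
          | some e' =>
            exact pvLoop_step g c1 c2 t1 t2 e d n1 n2 _ _ _ e'
              (pvLoopA_ge g _ _ _ _ _ hX) rfl (by
                by_cases h1 : pvIsGap g c1 = true <;> simp [h1]) (by simp [h2])
        · by_cases h1 : pvIsGap g c1 = true
          · -- gap in `second` (= seq1 here): the balance drops; break when it reaches zero
            simp only [h1, h2, ↓reduceIte, Bool.false_eq_true]
            by_cases hz : bal - 1 = 0 <;> simp only [hz, ↓reduceIte]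
            · have he : e + 1 - e = 1 := by omega
              rw [he]
              simp [pvZipDiffs, h1, h2]
            · rw [ih]
              cases hX : pvLoopA g t2 t1 (e + 1) (bal - 1) with
              | none => rfl
              | some e' =>
                exact pvLoop_step g c1 c2 t1 t2 e d n1 n2 _ _ _ e'
                  (pvLoopA_ge g _ _ _ _ _ hX) rfl (by simp [h1]) (by simp [h2])
          · -- no gap at this offset: both sides recurse with the same balance
            simp only [h1, h2, ↓reduceIte, Bool.false_eq_true]
            rw [ih]
            cases hX : pvLoopA g t2 t1 (e + 1) bal with
            | none => rfl
            | some e' =>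
              exact pvLoop_step g c1 c2 t1 t2 e d n1 n2 _ _ _ e'
                (pvLoopA_ge g _ _ _ _ _ hX) rfl (by simp [h1]) (by simp [h2])

-- characterisation of a successful first scan
theorem pvScanA_some (g : String) : ∀ (l1 l2 : List Char) (i s : Nat) (f : Bool),
    pvScanA g l1 l2 i = some (s, f) →
    i ≤ s ∧ ∃ a r1 b r2, l1.drop (s - i) = a :: r1 ∧ l2.drop (s - i) = b :: r2 ∧
      pvIsGap g a = f ∧ pvIsGap g b = !f := by
  intro l1
  induction l1 with
  | nil => intro l2 i s f h; cases l2 <;> simp [pvScanA] at h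
  | cons c1 r1 ih =>
    intro l2 i s f h
    cases l2 with
    | nil => simp [pvScanA] at h
    | cons c2 r2 =>
      simp only [pvScanA] at h
      split_ifs at h with h1 h2 h2 <;>
        first
          | exact Option.noConfusion h
          | (rw [Option.some.injEq, Prod.mk.injEq] at h
             obtain ⟨rfl, hf⟩ := h
             subst hf
             exact ⟨Nat.le_refl _, c1, r1, c2, r2, by simp, by simp, by simp_all, by simp_all⟩)
          | (obtain ⟨hle, a, r1', b, r2', hd1, hd2, hfa, hfb⟩ := ih _ _ _ _ h
             refine ⟨Nat.le_of_succ_le hle, a, r1', b, r2', ?_, ?_, hfa, hfb⟩ <;>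
               · rw [show s - i = (s - (i + 1)) + 1 by omega, List.drop_succ_cons]
                 first | exact hd1 | exact hd2)

-- ===== VERDICT (by name: the statement is the Claim_ definition above) =====
theorem removeFirstUnnecessaryGaps_spec : Claim_equal_removeFirstUnnecessaryGaps := by
  intro seq1 seq2 gapSymbol hdom hpre
  unfold Spec_removeFirstUnnecessaryGaps
  simp only [removeFirstUnnecessaryGaps, removeFirstUnnecessaryGaps_alt, pvScan_eq]
  cases hscan : pvScanA gapSymbol seq1.toList seq2.toList 0 with
  | none => simp
  | some sf =>
    obtain ⟨s, f⟩ := sf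
    obtain ⟨-, a, r1, b, r2, hd1, hd2, hfa, hfb⟩ := pvScanA_some gapSymbol _ _ _ _ _ hscan
    simp only [Nat.sub_zero] at hd1 hd2
    have hdr1 : seq1.toList.drop (s + 1) = r1 := by
      rw [← List.drop_drop, hd1]; rfl
    have hdr2 : seq2.toList.drop (s + 1) = r2 := by
      rw [← List.drop_drop, hd2]; rfl
    have hg1 : seq1.toList.getD s ' ' = a := by
      have h0 : (seq1.toList.drop s)[0]? = seq1.toList[s + 0]? := List.getElem?_drop
      rw [hd1] at h0
      simp only [Nat.add_zero] at h0
      simp [List.getD_eq_getElem?_getD, ← h0]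
    have hg2 : seq2.toList.getD s ' ' = b := by
      have h0 : (seq2.toList.drop s)[0]? = seq2.toList[s + 0]? := List.getElem?_drop
      rw [hd2] at h0
      simp only [Nat.add_zero] at h0
      simp [List.getD_eq_getElem?_getD, ← h0]
    have hfirst : (if f then seq1.toList else seq2.toList).drop (s + 1) = if f then r1 else r2 := by
      cases f <;> simp [hdr1, hdr2]
    have hsecond : (if f then seq2.toList else seq1.toList).drop (s + 1) = if f then r2 else r1 := by
      cases f <;> simp [hdr1, hdr2]
    simp only [hg1, hg2, hdr1, hdr2, hfirst, hsecond, pvLoop_eq]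
    cases hA : pvLoopA gapSymbol (if f then r1 else r2) (if f then r2 else r1) (s + 1) 1 with
    | none => rfl
    | some e =>
      have hge : s + 1 ≤ e := pvLoopA_ge gapSymbol _ _ _ _ _ hA
      have hk : e + 1 - s = (e + 1 - (s + 1)) + 1 := by omega
      simp only [hd1, hd2, hk, List.take_succ_cons, pvZipDiffs_cons, List.filter_cons]
      by_cases ha : pvIsGap gapSymbol a = true <;> by_cases hb : pvIsGap gapSymbol b = true <;>
        simp only [ha, hb, if_true, if_false, Bool.false_eq_true, Bool.not_true,
          Bool.not_false, List.nil_append, List.cons_append]
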